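-- pv_equiv track=rewrite | github.com/strictlex/Task_HT | Task1/Task1.py | circle_massiv
-- ===== SOURCE A (Python) =====
-- def circle_massiv(n, m):
--     lst = list(range(1, n + 1))
--     circle = lst.copy()
--     circle_m = []
--     for i in circle:
--         circle_m.append(circle[:m])
--         circle = circle[m - 1 :] + circle[: m - 1]
--         if circle_m[-1][-1] == lst[0]:
--             break
--     answer = ""
--     for el in circle_m:
--         answer += str(el[0])
--     return answer
-- ===== SOURCE B (Python) =====
-- def circle_massiv(n, m):
--     # Walk the circle by index arithmetic: the current start is position p in
--     # 1..n; each step prints person p+1, stops when the m-th person counted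
--     # from the current start is person 1, and advances the start by m-1
--     # places around the circle.
--     if n <= 0:
--         return ""
--     step = (m - 1) % n
--     out = []
--     p = 0
--     for _ in range(n):
--         out.append(str(p + 1))
--         if (p + m - 1) % n == 0:
--             break
--         p = (p + step) % n
--     return "".join(out)
-- ===== Notes on version B (the rewrite author's own statement) =====
-- stated objective: alternative
-- what changed: Replaces the repeated list slicing/rotation per step with a single integer cursor advanced by (m-1) mod n, so no lists are ever built or copied; Pre_ excludes only the inputs where A raises IndexError (0 < n with m = 0 or m <= -n, where circle[:m] is empty).
-- intended difference: For m > n on a circle of n >= 2 people, A's slices clamp so the rotation degenerates to the identity and A returns '1'*n, while B wraps the count around the circle (modular arithmetic) as intended for counting around a circle, e.g. at (4,5) A returns '1111' and B returns '1'. — e.g. on circle_massiv(4, 5): A returns "1111", B returns "1"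
import Mathlib
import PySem

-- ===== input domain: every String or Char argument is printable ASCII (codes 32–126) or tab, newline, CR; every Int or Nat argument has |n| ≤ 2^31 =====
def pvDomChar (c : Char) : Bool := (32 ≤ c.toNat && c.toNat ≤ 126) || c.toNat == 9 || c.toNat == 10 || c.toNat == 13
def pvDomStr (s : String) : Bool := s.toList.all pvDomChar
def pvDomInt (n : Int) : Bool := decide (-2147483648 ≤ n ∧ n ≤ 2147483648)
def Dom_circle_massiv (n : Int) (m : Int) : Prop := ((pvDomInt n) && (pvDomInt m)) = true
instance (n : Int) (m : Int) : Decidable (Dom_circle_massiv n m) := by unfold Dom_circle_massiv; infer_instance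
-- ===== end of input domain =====

-- B walks the circle with one integer cursor advanced by (m-1) mod n instead of slicing/rotating
-- lists; for m > n (n ≥ 2) B wraps the count around the circle where A's clamped slices do not (see D_).

-- ===== PORT A =====
-- the 'for i in circle: ... break' loop: recursion over the iterated list (i itself is unused),
-- state = (circle, accumulated circle_m); the break appends the chunk and stops
def pvLoopA (m : Int) (first : Int) : List Int → List Int → List (List Int)
  | [], _ => []
  | _ :: rest, circle =>
      let chunk := PySem.List.slice circle none (some m)
      let circle' := PySem.List.slice circle (some (m - 1)) none ++ PySem.List.slice circle none (some (m - 1))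
      if ((PySem.List.pyGet? chunk (-1)).getD 0) == first then [chunk]
      else chunk :: pvLoopA m first rest circle'

def circle_massiv (n : Int) (m : Int) : String :=
  let lst := PySem.List.pyRange 1 (n + 1) 1
  let circle_m := pvLoopA m ((PySem.List.pyGet? lst 0).getD 0) lst lst
  circle_m.foldl (fun answer el => answer ++ PySem.Int.toStr ((PySem.List.pyGet? el 0).getD 0)) ""

-- ===== PORT B =====
-- the 'for _ in range(n): ... break' loop of Source B, state = the cursor p, producing the list `out`
def pvLoopB (n m step : Int) : List Int → Int → List String
  | [], _ => []
  | _ :: rest, p =>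
      if PySem.Int.mod (p + m - 1) n == 0 then [PySem.Int.toStr (p + 1)]
      else PySem.Int.toStr (p + 1) :: pvLoopB n m step rest (PySem.Int.mod (p + step) n)

def circle_massiv_alt (n : Int) (m : Int) : String :=
  if n ≤ 0 then "" else
  let step := PySem.Int.mod (m - 1) n
  PySem.Str.join "" (pvLoopB n m step (PySem.List.pyRange 0 n 1) 0)

-- ===== PRECONDITION & SPEC =====
-- Pre_ excludes exactly the inputs where A raises an IndexError (circle[:m] is empty:
-- 0 < n with m = 0, or 0 < n with m ≤ -n); A returns normally everywhere else.
def Pre_circle_massiv (n : Int) (m : Int) : Prop := n ≤ 0 ∨ 1 ≤ m ∨ (m < 0 ∧ 1 ≤ n + m)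
instance (n : Int) (m : Int) : Decidable (Pre_circle_massiv n m) := by unfold Pre_circle_massiv; infer_instance
def pvWitness_circle_massiv : Int × Int := (5, 3)

-- For m > n on a circle of n ≥ 2 people, A's slices clamp so its rotation degenerates to the
-- identity and A returns "1"*n, while B wraps the count around the circle (modular arithmetic),
-- the intended behaviour when the count exceeds the circle's size.
def D_circle_massiv (n : Int) (m : Int) : Prop := 2 ≤ n ∧ n + 1 ≤ m
instance (n : Int) (m : Int) : Decidable (D_circle_massiv n m) := by unfold D_circle_massiv; infer_instance

def Spec_circle_massiv (n : Int) (m : Int) (out : String) : Prop := ¬ D_circle_massiv n m → out = circle_massiv_alt n m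
instance (n : Int) (m : Int) (out : String) : Decidable (Spec_circle_massiv n m out) := by unfold Spec_circle_massiv; infer_instance

def pvDiffWitness_circle_massiv : Int × Int := (4, 5)
def pvDiffWitnessOut_circle_massiv : String × String := ("1111", "1")

-- ===== CLAIM (what is proved, stated in full; the proofs are below) =====
def Claim_unchanged_circle_massiv : Prop := ∀ (n : Int) (m : Int), Dom_circle_massiv n m → Pre_circle_massiv n m → Spec_circle_massiv n m (circle_massiv n m)
def Claim_changed_circle_massiv : Prop := Dom_circle_massiv (pvDiffWitness_circle_massiv.1) (pvDiffWitness_circle_massiv.2) ∧ Pre_circle_massiv (pvDiffWitness_circle_massiv.1) (pvDiffWitness_circle_massiv.2) ∧ D_circle_massiv (pvDiffWitness_circle_massiv.1) (pvDiffWitness_circle_massiv.2) ∧ circle_massiv (pvDiffWitness_circle_massiv.1) (pvDiffWitness_circle_massiv.2) = pvDiffWitnessOut_circle_massiv.1 ∧ circle_massiv_alt (pvDiffWitness_circle_massiv.1) (pvDiffWitness_circle_massiv.2) = pvDiffWitnessOut_circle_massiv.2 ∧ pvDiffWitnessOut_circle_massiv.1 ≠ pvDiffWitnessOut_circle_ma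ssiv.2

-- ===== LEMMAS AND PROOFS =====

-- the circle after some steps: a rotation of [1..n], written as an index map
def pvC (N P : Nat) : List Int := (List.range N).map (fun i => (1 + ((P + i) % N : Nat) : Int))

theorem pvC_length (N P : Nat) : (pvC N P).length = N := by
  simp [pvC]

-- rotating pvC N P by t (t ≤ N) gives pvC N ((P + t) % N)
theorem pvC_rot (N P t : Nat) (ht : t ≤ N) :
    (pvC N P).drop t ++ (pvC N P).take t = pvC N ((P + t) % N) := by
  apply List.ext_getElem
  · simp [pvC]; omega
  · intro i h1 h2
    have hlen : ((pvC N P).drop t).length = N - t := by simp [pvC]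
    rw [List.getElem_append]
    split
    · rw [List.getElem_drop]
      simp only [pvC, List.getElem_map, List.getElem_range]
      have : P + (t + i) = (P + t) + i := by omega
      rw [this, ← Nat.mod_add_mod]
    · simp only [hlen]
      rw [List.getElem_take]
      simp only [pvC, List.getElem_map, List.getElem_range]
      simp only [List.length_append, List.length_take, List.length_drop, pvC,
        List.length_map, List.length_range] at h1
      have hd : (P + t) + i = (P + (i - (N - t))) + N := by omega
      congr 1
      rw [Nat.mod_add_mod, hd, Nat.add_mod_right]

-- taking the first c elements (c ≤ N)
theorem pvC_take (N P c : Nat) (hc : c ≤ N) :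
    (pvC N P).take c = (List.range c).map (fun i => (1 + ((P + i) % N : Nat) : Int)) := by
  rw [pvC, ← List.map_take, List.take_range, Nat.min_eq_left hc]

theorem join_empty_cons (x : String) (t : List String) :
    PySem.Str.join "" (x :: t) = x ++ PySem.Str.join "" t := by
  simp only [PySem.Str.join, List.map_cons]
  cases t with
  | nil =>
      show String.ofList (PySem.Chars.join [] [x.toList]) = _
      rw [PySem.Chars.join_singleton]
      apply String.toList_injective
      simp [PySem.Chars.join, List.intercalate]
  | cons y u =>
      rw [List.map_cons, PySem.Chars.join_cons_cons]
      apply String.toList_injective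
      simp

theorem foldl_append_join (l : List String) :
    ∀ acc : String, l.foldl (· ++ ·) acc = acc ++ PySem.Str.join "" l := by
  induction l with
  | nil => intro acc; simp [PySem.Str.join, PySem.Chars.join, List.intercalate]
  | cons x t ih => intro acc; rw [List.foldl_cons, ih, join_empty_cons, String.append_assoc]

theorem mod_toNat (a n : Int) (ha : 0 ≤ a) (hn : 0 < n) :
    PySem.Int.mod a n = ((a.toNat % n.toNat : Nat) : Int) := by
  rw [PySem.Int.mod_eq_emod_of_pos hn, Int.natCast_mod, Int.toNat_of_nonneg ha,
      Int.toNat_of_nonneg (le_of_lt hn)]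

-- the value of step = (m-1) % n on the two admitted regions
theorem pv_s_val (n m : Int) (hn : 0 < n)
    (hpre : (1 ≤ m ∧ m ≤ n) ∨ (m < 0 ∧ 1 ≤ n + m)) :
    PySem.Int.mod (m - 1) n = (if 1 ≤ m then m - 1 else n + m - 1) := by
  rcases hpre with ⟨h1, h2⟩ | ⟨h1, h2⟩
  · rw [if_pos h1, PySem.Int.mod_eq_emod_of_pos hn, Int.emod_eq_of_lt (by omega) (by omega)]
  · rw [if_neg (by omega), PySem.Int.mod_eq_emod_of_pos hn,
      show m - 1 = (n + m - 1) + (-1) * n by ring, Int.add_mul_emod_self_right,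
      Int.emod_eq_of_lt (by omega) (by omega)]

-- the chunk circle[:m] when circle = pvC n.toNat P: the first s+1 elements
theorem pvChunk_eq (n m s : Int) (P : Nat) (hn : 0 < n) (hP : P < n.toNat)
    (hpre : (1 ≤ m ∧ m ≤ n) ∨ (m < 0 ∧ 1 ≤ n + m))
    (hs : s = PySem.Int.mod (m - 1) n) :
    PySem.List.slice (pvC n.toNat P) none (some m)
      = (List.range (s.toNat + 1)).map (fun i => (1 + ((P + i) % n.toNat : Nat) : Int)) := by
  have hsv := pv_s_val n m hn hpre
  rcases hpre with ⟨h1, h2⟩ | ⟨h2a, h2b⟩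
  · rw [if_pos h1] at hsv
    rw [PySem.List.slice_to (pvC n.toNat P) (by omega : (0:Int) ≤ m), List.take_eq_take_min, pvC_length]
    have hmin : min m.toNat n.toNat = s.toNat + 1 := by rw [hs, hsv]; omega
    rw [hmin]; exact pvC_take _ _ _ (by rw [hs, hsv]; omega)
  · rw [if_neg (by omega)] at hsv
    have hm : (some m) = (some (-(((-m).toNat : Nat) : Int))) := by congr 1; omega
    rw [hm, PySem.List.slice_to_neg_natCast (pvC n.toNat P) _ (by omega), pvC_length]
    have hc : n.toNat - (-m).toNat = s.toNat + 1 := by rw [hs, hsv]; omega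
    rw [hc]; exact pvC_take _ _ _ (by rw [hs, hsv]; omega)

-- the rotation circle[m-1:] + circle[:m-1] when circle = pvC n.toNat P: rotation by s
theorem pvRot_eq (n m s : Int) (P : Nat) (hn : 0 < n) (hP : P < n.toNat)
    (hpre : (1 ≤ m ∧ m ≤ n) ∨ (m < 0 ∧ 1 ≤ n + m))
    (hs : s = PySem.Int.mod (m - 1) n) :
    PySem.List.slice (pvC n.toNat P) (some (m - 1)) none
        ++ PySem.List.slice (pvC n.toNat P) none (some (m - 1))
      = pvC n.toNat ((P + s.toNat) % n.toNat) := by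
  have hsv := pv_s_val n m hn hpre
  rcases hpre with ⟨h1, h2⟩ | ⟨h2a, h2b⟩
  · rw [if_pos h1] at hsv
    rw [PySem.List.slice_from (pvC n.toNat P) (by omega : (0:Int) ≤ m - 1),
        PySem.List.slice_to (pvC n.toNat P) (by omega : (0:Int) ≤ m - 1)]
    rw [pvC_rot _ _ _ (by omega : (m-1).toNat ≤ n.toNat)]
    congr 2
    rw [hs, hsv]
  · rw [if_neg (by omega)] at hsv
    have hm : (some (m - 1)) = (some (-(((1 - m).toNat : Nat) : Int))) := by congr 1; omega
    rw [hm, PySem.List.slice_from_neg_natCast (pvC n.toNat P) _ (by omega),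
        PySem.List.slice_to_neg_natCast (pvC n.toNat P) _ (by omega), pvC_length]
    rw [pvC_rot _ _ _ (by omega)]
    congr 2
    rw [hs, hsv]
    omega

theorem range_map_head (c : Nat) (hc : 0 < c) (f : Nat → Int) :
    (PySem.List.pyGet? ((List.range c).map f) 0).getD 0 = f 0 := by
  rw [PySem.List.pyGet?_zero]
  simp [hc]

theorem range_map_last (c : Nat) (hc : 0 < c) (f : Nat → Int) :
    PySem.List.pyGet? ((List.range c).map f) (-1) = some (f (c - 1)) := by
  rw [PySem.List.pyGet?_neg_one, List.getLast?_eq_getElem?]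
  simp [Nat.sub_lt hc]

-- B's break test (p + m - 1) % n == 0 computes the same value the chunk's last element encodes
theorem pv_cond_eq (n m s : Int) (P : Nat) (hn : 0 < n) (hs : s = PySem.Int.mod (m - 1) n) :
    PySem.Int.mod ((P : Int) + m - 1) n = (((P + s.toNat) % n.toNat : Nat) : Int) := by
  have hs0 : 0 ≤ s := by rw [hs]; exact PySem.Int.mod_nonneg _ (by omega)
  have e1 : (P : Int) + m - 1 = ((P : Int) + s) + ((m - 1) / n) * n := by
    rw [hs, PySem.Int.mod_eq_emod_of_pos hn]
    have := Int.emod_add_ediv (m - 1) n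
    linarith
  rw [PySem.Int.mod_eq_emod_of_pos hn, e1, Int.add_mul_emod_self_right,
    ← PySem.Int.mod_eq_emod_of_pos hn, mod_toNat _ _ (by omega) hn]
  congr 2
  omega

theorem main_loop (n m s : Int) (hn : 0 < n)
    (hs : s = PySem.Int.mod (m - 1) n)
    (hpre : (1 ≤ m ∧ m ≤ n) ∨ (m < 0 ∧ 1 ≤ n + m)) :
    ∀ (it itB : List Int) (P : Nat), itB.length = it.length → P < n.toNat →
      (pvLoopA m 1 it (pvC n.toNat P)).map
          (fun el => PySem.Int.toStr ((PySem.List.pyGet? el 0).getD 0))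
        = pvLoopB n m s itB (P : Int) := by
  intro it
  induction it with
  | nil =>
      intro itB P hlen _
      rw [List.length_eq_zero_iff.mp hlen]
      rfl
  | cons a rest ih =>
      intro itB P hlen hP
      obtain ⟨b, restB, rfl⟩ : ∃ b restB, itB = b :: restB := by
        cases itB with
        | nil => simp at hlen
        | cons b restB => exact ⟨b, restB, rfl⟩
      have hs0 : 0 ≤ s := by rw [hs]; exact PySem.Int.mod_nonneg _ (by omega)
      have hslt : s < n := by rw [hs]; exact PySem.Int.mod_lt _ (by omega)
      simp only [pvLoopA, pvLoopB]
      rw [pvChunk_eq n m s P hn hP hpre hs, pvRot_eq n m s P hn hP hpre hs,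
        range_map_last _ (Nat.succ_pos _), pv_cond_eq n m s P hn hs]
      simp only [Nat.succ_sub_one, Option.getD_some, beq_iff_eq]
      have hnext : PySem.Int.mod ((P : Int) + s) n = (((P + s.toNat) % n.toNat : Nat) : Int) := by
        rw [mod_toNat _ _ (by omega) hn]
        congr 2
        omega
      by_cases hb : (P + s.toNat) % n.toNat = 0
      · rw [if_pos (by omega : (1 + ((P + s.toNat) % n.toNat : Nat) : Int) = 1),
          if_pos (by omega : (((P + s.toNat) % n.toNat : Nat) : Int) = 0)]
        simp only [List.map_cons, List.map_nil]
        rw [range_map_head _ (Nat.succ_pos _)]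
        have he : ((1 : Int) + ((P + 0) % n.toNat : Nat)) = (P : Int) + 1 := by
          rw [Nat.add_zero, Nat.mod_eq_of_lt hP]; omega
        simp only [he]
      · rw [if_neg (by omega : ¬ (1 + ((P + s.toNat) % n.toNat : Nat) : Int) = 1),
          if_neg (by omega : ¬ (((P + s.toNat) % n.toNat : Nat) : Int) = 0)]
        simp only [List.map_cons]
        congr 1
        · rw [range_map_head _ (Nat.succ_pos _)]
          have he : ((1 : Int) + ((P + 0) % n.toNat : Nat)) = (P : Int) + 1 := by
            rw [Nat.add_zero, Nat.mod_eq_of_lt hP]; omega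
          simp only [he]
        · rw [hnext]
          exact ih restB _ (by simpa using hlen) (Nat.mod_lt _ (by omega))

theorem pvLoopA_n1 (m : Int) (hm : 1 ≤ m) : pvLoopA m 1 [1] [1] = [[1]] := by
  have hchunk : PySem.List.slice ([1] : List Int) none (some m) = [1] := by
    rw [PySem.List.slice_to _ (by omega : (0:Int) ≤ m)]
    exact List.take_of_length_le (by simp; omega)
  simp only [pvLoopA, hchunk]
  decide

theorem pvLoopB_n1 (m step : Int) : pvLoopB 1 m step [0] 0 = [PySem.Int.toStr (0 + 1)] := by
  simp only [pvLoopB]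
  rw [if_pos (by simp [PySem.Int.mod])]

-- ===== VERDICT (by name: the statements are the Claim_ definitions above) =====
theorem circle_massiv_spec : Claim_unchanged_circle_massiv := by
  intro n m _ hpre
  unfold Spec_circle_massiv
  intro hnd
  unfold circle_massiv circle_massiv_alt
  by_cases hn : n ≤ 0
  · rw [if_pos hn, PySem.List.pyRange_one_eq_nil (by omega : n + 1 ≤ 1)]
    rfl
  · rw [if_neg hn]
    have hn' : 0 < n := by omega
    unfold D_circle_massiv at hnd
    by_cases hn1 : n = 1
    · subst hn1
      have hm1 : 1 ≤ m := by rcases hpre with h | h | h <;> omega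
      show (pvLoopA m ((PySem.List.pyGet? (PySem.List.pyRange 1 (1 + 1) 1) 0).getD 0)
          (PySem.List.pyRange 1 (1 + 1) 1) (PySem.List.pyRange 1 (1 + 1) 1)).foldl
          (fun answer el => answer ++ PySem.Int.toStr ((PySem.List.pyGet? el 0).getD 0)) ""
        = PySem.Str.join "" (pvLoopB 1 m (PySem.Int.mod (m - 1) 1) (PySem.List.pyRange 0 1 1) 0)
      rw [show PySem.List.pyRange 1 (1 + 1) 1 = [1] from by decide,
        show PySem.List.pyRange 0 1 1 = [0] from by decide,
        show ((PySem.List.pyGet? ([1] : List Int) 0).getD 0) = 1 from by decide,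
        pvLoopA_n1 m hm1, pvLoopB_n1 m _]
      decide
    have hpre' : (1 ≤ m ∧ m ≤ n) ∨ (m < 0 ∧ 1 ≤ n + m) := by
      rcases hpre with h | h | h <;> omega
    have hlst : PySem.List.pyRange 1 (n + 1) 1 = pvC n.toNat 0 := by
      rw [PySem.List.pyRange_one, pvC, show n + 1 - 1 = n from by ring]
      apply List.map_congr_left
      intro i hi
      rw [List.mem_range] at hi
      rw [Nat.zero_add, Nat.mod_eq_of_lt hi]
    have hfirst : ((PySem.List.pyGet? (pvC n.toNat 0) 0).getD 0) = 1 := by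
      rw [pvC, range_map_head _ (by omega)]
      simp
    have hml := main_loop n m _ hn' rfl hpre' (pvC n.toNat 0) (PySem.List.pyRange 0 n 1) 0
      (by rw [PySem.List.pyRange_one, pvC]; simp) (by omega)
    show (pvLoopA m ((PySem.List.pyGet? (PySem.List.pyRange 1 (n + 1) 1) 0).getD 0)
        (PySem.List.pyRange 1 (n + 1) 1) (PySem.List.pyRange 1 (n + 1) 1)).foldl
        (fun answer el => answer ++ PySem.Int.toStr ((PySem.List.pyGet? el 0).getD 0)) "" = _
    rw [hlst, hfirst,
      ← List.foldl_map (f := fun el => PySem.Int.toStr ((PySem.List.pyGet? el 0).getD 0))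
        (g := fun (ans : String) x => ans ++ x), hml, foldl_append_join]
    show _ = PySem.Str.join "" (pvLoopB n m _ (PySem.List.pyRange 0 n 1) 0)
    apply String.toList_injective
    simp

theorem circle_massiv_changed : Claim_changed_circle_massiv := by
  unfold Claim_changed_circle_massiv
  decide
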